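-- pv_equiv track=rewrite | github.com/geckoblu/xfce4-windowck-plugin | themes/windowck/unity/generator.py | holeSize
-- ===== SOURCE A (Python) =====
-- def holeSize(txt):
--     ''' Detects hole on a xpm string, used to find border sizes.'''
--     lastwidth = 0
--     inhole = 0
--     for line in txt.split("\n"):
--         if " " in line:
--             lastwidth = line.count(" ")
--             inhole += 1
--         elif inhole > 0:
--             return (lastwidth, inhole)
--     raise ValueError
-- ===== SOURCE B (Python) =====
-- def holeSize(txt):
--     ''' Detects hole on a xpm string, used to find border sizes.'''
--     lines = txt.split("\n")
--     n = len(lines)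
--     i = 0
--     while i < n and " " not in lines[i]:
--         i += 1
--     j = i
--     while j < n and " " in lines[j]:
--         j += 1
--     if i == n or j == n:
--         raise ValueError
--     return (lines[j - 1].count(" "), j - i)
-- ===== Notes on version B (the rewrite author's own statement) =====
-- stated objective: alternative
-- what changed: B locates the first run of space-containing lines with two explicit index scans (skip non-space prefix, then measure the run) and reads the answer off the run's boundary indices, instead of A's single pass threading lastwidth/inhole accumulators.
import Mathlib
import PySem

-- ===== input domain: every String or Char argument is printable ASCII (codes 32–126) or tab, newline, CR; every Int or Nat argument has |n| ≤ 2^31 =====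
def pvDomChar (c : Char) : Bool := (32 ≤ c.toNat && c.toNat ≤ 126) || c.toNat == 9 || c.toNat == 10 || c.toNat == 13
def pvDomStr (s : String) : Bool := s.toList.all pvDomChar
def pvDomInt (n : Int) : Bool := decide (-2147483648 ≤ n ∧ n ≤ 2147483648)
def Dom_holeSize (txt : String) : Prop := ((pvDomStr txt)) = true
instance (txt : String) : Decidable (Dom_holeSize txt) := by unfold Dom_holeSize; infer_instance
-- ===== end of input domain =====

-- B restructures A's single accumulator pass as two explicit index scans over the split lines; same O(n) cost (objective: alternative).

-- ===== PORT A =====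
-- A's for-loop over txt.split("\n") with accumulators lastwidth/inhole; the final
-- 'raise ValueError' is the [] case (returns a junk value, excluded by Pre_).
def holeSizeLoopA : List String → Int → Int → Int × Int
  | [], _, _ => (0, 0)
  | line :: rest, lastwidth, inhole =>
    if PySem.Str.isIn " " line then
      holeSizeLoopA rest (PySem.Str.count line " " : Int) (inhole + 1)
    else if inhole > 0 then (lastwidth, inhole)
    else holeSizeLoopA rest lastwidth inhole

-- txt.split("\n"): sep is the nonempty "\n", so split? is always `some`
def holeSize (txt : String) : Int × Int :=
  holeSizeLoopA ((PySem.Str.split? txt "\n").getD []) 0 0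

-- ===== PORT B =====
-- first while loop: advance i while " " not in lines[i]
def holeSizeSkipNo : List String → Nat → Nat
  | [], i => i
  | l :: rest, i => if PySem.Str.isIn " " l then i else holeSizeSkipNo rest (i + 1)

-- second while loop: advance j while " " in lines[j]
def holeSizeSkipSp : List String → Nat → Nat
  | [], j => j
  | l :: rest, j => if PySem.Str.isIn " " l then holeSizeSkipSp rest (j + 1) else j

def holeSize_alt (txt : String) : Int × Int :=
  let lines := (PySem.Str.split? txt "\n").getD []
  let n := lines.length
  let i := holeSizeSkipNo lines 0
  let j := holeSizeSkipSp (lines.drop i) i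
  if i = n ∨ j = n then (0, 0)   -- 'raise ValueError' (excluded by Pre_)
  else
    match lines[j - 1]? with
    | some l => ((PySem.Str.count l " " : Int), ((j : Int) - (i : Int)))
    | none => (0, 0)

-- ===== PRECONDITION & SPEC =====
-- Pre_ excludes exactly the inputs on which A (and B) raise ValueError: inputs whose
-- split lines contain no space-bearing line, or whose first run of space-bearing lines
-- extends to the end of the input.
def Pre_holeSize (txt : String) : Prop :=
  (((PySem.Str.split? txt "\n").getD []).dropWhile
      (fun l => !PySem.Str.isIn " " l)).dropWhile (fun l => PySem.Str.isIn " " l) ≠ []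
instance (txt : String) : Decidable (Pre_holeSize txt) := by unfold Pre_holeSize; infer_instance

def pvWitness_holeSize : String := "ab\na b\nc"

def Spec_holeSize (txt : String) (out : Int × Int) : Prop := out = holeSize_alt txt
instance (txt : String) (out : Int × Int) : Decidable (Spec_holeSize txt out) := by unfold Spec_holeSize; infer_instance

-- ===== CLAIM (what is proved, stated in full; the proofs are below) =====
def Claim_equal_holeSize : Prop := ∀ (txt : String), Dom_holeSize txt → Pre_holeSize txt → Spec_holeSize txt (holeSize txt)

-- ===== LEMMAS AND PROOFS =====

theorem pvDropTakeWhile {α : Type} (p : α → Bool) (l : List α) :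
    l.drop (l.takeWhile p).length = l.dropWhile p := by
  induction l with
  | nil => simp
  | cons a t ih =>
    by_cases h : p a <;> simp [h, ih]

theorem skipNo_eq (ls : List String) (i : Nat) :
    holeSizeSkipNo ls i = i + (ls.takeWhile (fun l => !PySem.Str.isIn " " l)).length := by
  induction ls generalizing i with
  | nil => simp [holeSizeSkipNo]
  | cons l rest ih =>
    by_cases h : PySem.Str.isIn " " l = true
    · have h' : PySem.Chars.isIn [' '] l.toList = true := by simpa using h
      simp [holeSizeSkipNo, h']
    · have h' : PySem.Chars.isIn [' '] l.toList = false := by simpa using h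
      simp [holeSizeSkipNo, h', ih]
      omega

theorem skipSp_eq (ls : List String) (j : Nat) :
    holeSizeSkipSp ls j = j + (ls.takeWhile (fun l => PySem.Str.isIn " " l)).length := by
  induction ls generalizing j with
  | nil => simp [holeSizeSkipSp]
  | cons l rest ih =>
    by_cases h : PySem.Str.isIn " " l = true
    · have h' : PySem.Chars.isIn [' '] l.toList = true := by simpa using h
      simp [holeSizeSkipSp, h', ih]
      omega
    · have h' : PySem.Chars.isIn [' '] l.toList = false := by simpa using h
      simp [holeSizeSkipSp, h']

-- skipping phase of A: non-space lines with inhole = 0 leave the state untouched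
theorem loopA_skip (A t : List String) (hA : ∀ l ∈ A, ¬ PySem.Str.isIn " " l = true) (lw : Int) :
    holeSizeLoopA (A ++ t) lw 0 = holeSizeLoopA t lw 0 := by
  induction A with
  | nil => rfl
  | cons x A' ih =>
    have hx := hA x (by simp)
    rw [List.cons_append, holeSizeLoopA, if_neg hx, if_neg (by omega : ¬ (0 : Int) > 0)]
    exact ih (fun l hl => hA l (by simp [hl]))

-- run phase of A: a block of space lines adds its length to inhole and sets
-- lastwidth to the count of its last line
theorem loopA_run (r : List String) (hr : ∀ l ∈ r, PySem.Str.isIn " " l = true) :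
    ∀ (t : List String) (lw ih : Int),
      holeSizeLoopA (r ++ t) lw ih =
        holeSizeLoopA t ((r.getLast?.map (fun l => (PySem.Str.count l " " : Int))).getD lw)
          (ih + r.length) := by
  induction r with
  | nil => intro t lw ih; simp
  | cons x r' ihr =>
    intro t lw ih
    have hx := hr x (by simp)
    rw [List.cons_append, holeSizeLoopA, if_pos hx,
      ihr (fun l hl => hr l (by simp [hl]))]
    cases r' with
    | nil => simp
    | cons y r'' =>
      obtain ⟨z, hz⟩ : ∃ z, (y :: r'').getLast? = some z :=
        ⟨(y :: r'').getLast (by simp), List.getLast?_eq_some_getLast (by simp)⟩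
      simp [hz]
      congr 1
      ring

theorem holeSize_spec_aux (txt : String) (hpre : Pre_holeSize txt) :
    holeSize txt = holeSize_alt txt := by
  unfold Pre_holeSize at hpre
  set ls := (PySem.Str.split? txt "\n").getD [] with hls
  set A := ls.takeWhile (fun l => !PySem.Str.isIn " " l) with hA
  set R0 := ls.dropWhile (fun l => !PySem.Str.isIn " " l) with hR0
  set r := R0.takeWhile (fun l => PySem.Str.isIn " " l) with hr
  set rest := R0.dropWhile (fun l => PySem.Str.isIn " " l) with hrest
  have hsplit1 : ls = A ++ R0 := (List.takeWhile_append_dropWhile).symm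
  have hsplit2 : R0 = r ++ rest := (List.takeWhile_append_dropWhile).symm
  have hrestne : rest ≠ [] := hpre
  have hR0ne : R0 ≠ [] := by
    intro h; apply hrestne; rw [hrest, h]; rfl
  have hAmem : ∀ l ∈ A, ¬ PySem.Str.isIn " " l = true := by
    intro l hl
    have := List.mem_takeWhile_imp hl
    simpa using this
  have hrmem : ∀ l ∈ r, PySem.Str.isIn " " l = true := by
    intro l hl
    exact List.mem_takeWhile_imp hl
  have hrne : r ≠ [] := by
    obtain ⟨x, R0', hx⟩ := List.exists_cons_of_ne_nil hR0ne
    have hd : List.dropWhile (fun l => !PySem.Str.isIn " " l) ls = x :: R0' := by rw [← hR0, hx]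
    have hxp : PySem.Str.isIn " " x = true := by
      have h2 := List.head_dropWhile_not (fun l => !PySem.Str.isIn " " l) (l := ls) (by rw [hd]; simp)
      simp only [hd, List.head_cons] at h2
      simpa using h2
    rw [hr, hx, List.takeWhile_cons, if_pos hxp]
    simp
  obtain ⟨x, rest', hxrest⟩ := List.exists_cons_of_ne_nil hrestne
  have hxns : ¬ PySem.Str.isIn " " x = true := by
    have hd : List.dropWhile (fun l => PySem.Str.isIn " " l) R0 = x :: rest' := by
      rw [← hrest, hxrest]
    have h2 := List.head_dropWhile_not (fun l => PySem.Str.isIn " " l) (l := R0) (by rw [hd]; simp)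
    simp only [hd, List.head_cons] at h2
    simpa using h2
  have hrpos : 0 < r.length := List.length_pos_iff.mpr hrne
  have hrestpos : 0 < rest.length := List.length_pos_iff.mpr hrestne
  -- ===== A side =====
  have hAside : holeSize txt =
      (((r.getLast?.map (fun l => (PySem.Str.count l " " : Int))).getD 0), (r.length : Int)) := by
    unfold holeSize
    rw [← hls, hsplit1, hsplit2, loopA_skip A _ hAmem, loopA_run r hrmem, hxrest]
    rw [holeSizeLoopA, if_neg hxns, if_pos (by omega : (0 : Int) + r.length > 0)]
    simp
  -- ===== B side =====
  have hi : holeSizeSkipNo ls 0 = A.length := by rw [skipNo_eq]; simp [hA]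
  have hdrop : ls.drop A.length = R0 := by
    rw [hA, hR0]; exact pvDropTakeWhile _ ls
  have hj : holeSizeSkipSp (ls.drop A.length) A.length = A.length + r.length := by
    rw [hdrop, skipSp_eq]
  have hlen : ls.length = A.length + r.length + rest.length := by
    rw [hsplit1, hsplit2]; simp; omega
  have hget : ls[A.length + r.length - 1]? = r.getLast? := by
    rw [hsplit1, hsplit2]
    rw [List.getElem?_append_right (by omega)]
    rw [List.getElem?_append_left (by omega)]
    rw [List.getLast?_eq_getElem?]
    congr 1
    omega
  have hBside : holeSize_alt txt =
      (((r.getLast?.map (fun l => (PySem.Str.count l " " : Int))).getD 0), (r.length : Int)) := by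
    unfold holeSize_alt
    rw [← hls]
    simp only [hi, hj]
    rw [if_neg (by simp only [not_or]; constructor <;> omega : ¬ (A.length = ls.length ∨ A.length + r.length = ls.length))]
    rw [hget]
    obtain ⟨lastl, hlastl⟩ : ∃ lastl, r.getLast? = some lastl := by
      cases hre : r with
      | nil => exact absurd hre hrne
      | cons a as => exact ⟨(a :: as).getLast (by simp), List.getLast?_eq_some_getLast (by simp)⟩
    rw [hlastl]
    simp
  rw [hAside, hBside]

-- ===== VERDICT (by name: the statement is the Claim_ definition above) =====
theorem holeSize_spec : Claim_equal_holeSize := by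
  intro txt _ hpre
  exact holeSize_spec_aux txt hpre
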